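-- pv_equiv track=rewrite | github.com/alexh-scrt/homunculus | src/arena/game_theory/coalition_detection.py | _count_synchronized_actions
-- ===== SOURCE A (Python) =====
-- from typing import Dict, List, Set, Tuple, Optional, Any
-- from collections import defaultdict
--
-- def _count_synchronized_actions(
--
--     agent1: str,
--     agent2: str,
--     interactions: List[Dict]
-- ) -> int:
--     """Count synchronized actions."""
--     synchronized = 0
--
--     # Group interactions by turn
--     turns = defaultdict(list)
--     for interaction in interactions:
--         turns[interaction["turn"]].append(interaction["sender"])
--
--     # Check for synchronized behavior
--     for turn_agents in turns.values():
--         if agent1 in turn_agents and agent2 in turn_agents: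
--             synchronized += 1
--
--     return synchronized
-- ===== SOURCE B (Python) =====
-- def _count_synchronized_actions(
--     agent1: str,
--     agent2: str,
--     interactions,
-- ) -> int:
--     """Count synchronized actions."""
--     turns1 = set()
--     turns2 = set()
--     for interaction in interactions:
--         turn = interaction["turn"]
--         sender = interaction["sender"]
--         if sender == agent1:
--             turns1.add(turn)
--         if sender == agent2:
--             turns2.add(turn)
--     return len(turns1 & turns2)
-- ===== Notes on version B (the rewrite author's own statement) =====
-- stated objective: simpler
-- what changed: Instead of grouping interactions into per-turn sender lists and then scanning each list for both agents, B keeps one set of turn ids per agent during a single pass and returns the size of their intersection.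
import Mathlib
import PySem

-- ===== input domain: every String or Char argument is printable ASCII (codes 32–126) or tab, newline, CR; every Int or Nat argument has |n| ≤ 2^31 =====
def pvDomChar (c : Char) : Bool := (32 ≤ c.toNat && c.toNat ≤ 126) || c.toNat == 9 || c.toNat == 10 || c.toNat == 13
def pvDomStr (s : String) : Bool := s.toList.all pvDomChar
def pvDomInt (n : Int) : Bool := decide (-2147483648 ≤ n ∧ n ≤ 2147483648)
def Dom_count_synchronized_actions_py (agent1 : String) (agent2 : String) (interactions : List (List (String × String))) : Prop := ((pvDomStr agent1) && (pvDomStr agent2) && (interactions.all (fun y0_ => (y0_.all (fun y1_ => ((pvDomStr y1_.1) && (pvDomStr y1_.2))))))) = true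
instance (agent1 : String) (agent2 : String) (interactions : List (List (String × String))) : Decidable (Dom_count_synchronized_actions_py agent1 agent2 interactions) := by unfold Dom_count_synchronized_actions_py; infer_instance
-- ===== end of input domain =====

-- B replaces A's per-turn sender-list grouping by two sets of turn ids (one per agent) built in
-- one pass, returning the size of their intersection; same return value, different data structure.


-- shared helper: interaction[key] (first-match lookup); Pre_ guarantees the key is present,
-- so the "" default is never reached on admitted inputs
def pvItem (interaction : List (String × String)) (key : String) : String :=
  ((PySem.Dict.mk interaction).get? key).getD ""

-- ===== PORT A =====
def count_synchronized_actions_py (agent1 : String) (agent2 : String) (interactions : List (List (String × String))) : Int :=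
  let turns : PySem.Dict String (List String) :=
    interactions.foldl (fun d interaction =>
      d.modify (pvItem interaction "turn") [] (fun l => l ++ [pvItem interaction "sender"]))
      PySem.Dict.empty
  turns.values.foldl (fun synchronized turn_agents =>
    if turn_agents.contains agent1 && turn_agents.contains agent2 then synchronized + 1
    else synchronized) 0

-- ===== PORT B =====
def count_synchronized_actions_py_alt (agent1 : String) (agent2 : String) (interactions : List (List (String × String))) : Int :=
  let p : PySem.Set String × PySem.Set String :=
    interactions.foldl (fun st interaction =>
      (if pvItem interaction "sender" == agent1 then PySem.Set.add st.1 (pvItem interaction "turn") else st.1,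
       if pvItem interaction "sender" == agent2 then PySem.Set.add st.2 (pvItem interaction "turn") else st.2))
      (PySem.Set.empty, PySem.Set.empty)
  PySem.Set.len (PySem.Set.inter p.1 p.2)

-- ===== PRECONDITION & SPEC =====
-- Pre_ excludes exactly the inputs where some interaction lacks the "turn" or "sender" key,
-- on which Python A raises KeyError.
def Pre_count_synchronized_actions_py (agent1 : String) (agent2 : String) (interactions : List (List (String × String))) : Prop :=
  ∀ i ∈ interactions, ((PySem.Dict.mk i).get? "turn").isSome = true ∧ ((PySem.Dict.mk i).get? "sender").isSome = true
instance (agent1 : String) (agent2 : String) (interactions : List (List (String × String))) : Decidable (Pre_count_synchronized_actions_py agent1 agent2 interactions) := by unfold Pre_count_synchronized_actions_py; infer_instance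

def pvWitness_count_synchronized_actions_py : String × String × (List (List (String × String))) :=
  ("a", "b", [[("turn", "1"), ("sender", "a")], [("turn", "1"), ("sender", "b")]])

def Spec_count_synchronized_actions_py (agent1 : String) (agent2 : String) (interactions : List (List (String × String))) (out : Int) : Prop := out = count_synchronized_actions_py_alt agent1 agent2 interactions
instance (agent1 : String) (agent2 : String) (interactions : List (List (String × String))) (out : Int) : Decidable (Spec_count_synchronized_actions_py agent1 agent2 interactions out) := by unfold Spec_count_synchronized_actions_py; infer_instance

-- ===== CLAIM (what is proved, stated in full; the proofs are below) =====
def Claim_equal_count_synchronized_actions_py : Prop := ∀ (agent1 : String) (agent2 : String) (interactions : List (List (String × String))), Dom_count_synchronized_actions_py agent1 agent2 interactions → Pre_count_synchronized_actions_py agent1 agent2 interactions → Spec_count_synchronized_actions_py agent1 agent2 interactions (count_synchronized_actions_py agent1 agent2 interactions)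

-- ===== LEMMAS AND PROOFS =====

-- the (turn, sender) view of the interaction list
def pvPairs (xs : List (List (String × String))) : List (String × String) :=
  xs.map (fun i => (pvItem i "turn", pvItem i "sender"))

lemma mem_foldl_cond_add (a : String) (l : List (List (String × String)))
    (s0 : PySem.Set String) (x : String) :
    (x ∈ l.foldl (fun s i => if pvItem i "sender" == a then PySem.Set.add s (pvItem i "turn") else s) s0) ↔
      x ∈ s0 ∨ ∃ i ∈ l, pvItem i "sender" = a ∧ pvItem i "turn" = x := by
  induction l generalizing s0 with
  | nil => simp
  | cons h t ih =>
    by_cases hc : pvItem h "sender" = a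
    · simp only [List.foldl_cons, hc, beq_self_eq_true, if_true, ih, PySem.Set.mem_add,
        List.mem_cons]
      constructor
      · rintro (((hs | rfl)) | ⟨i, hi, h1, h2⟩)
        · exact Or.inl hs
        · exact Or.inr ⟨h, Or.inl rfl, hc, rfl⟩
        · exact Or.inr ⟨i, Or.inr hi, h1, h2⟩
      · rintro (hs | ⟨i, (rfl | hi), h1, h2⟩)
        · exact Or.inl (Or.inl hs)
        · exact Or.inl (Or.inr h2.symm)
        · exact Or.inr ⟨i, hi, h1, h2⟩
    · have : (pvItem h "sender" == a) = false := by simp [hc]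
      simp only [List.foldl_cons, this, ih, List.mem_cons]
      constructor
      · rintro (hs | ⟨i, hi, h1, h2⟩)
        · exact Or.inl hs
        · exact Or.inr ⟨i, Or.inr hi, h1, h2⟩
      · rintro (hs | ⟨i, (rfl | hi), h1, h2⟩)
        · exact Or.inl hs
        · exact absurd h1 hc
        · exact Or.inr ⟨i, hi, h1, h2⟩

lemma nodup_foldl_cond_add (a : String) (l : List (List (String × String)))
    (s0 : PySem.Set String) (h : s0.Nodup) :
    (l.foldl (fun s i => if pvItem i "sender" == a then PySem.Set.add s (pvItem i "turn") else s) s0).Nodup := by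
  induction l generalizing s0 with
  | nil => exact h
  | cons hd t ih =>
    simp only [List.foldl_cons]
    apply ih
    split
    · exact PySem.Set.nodup_add _ _ h
    · exact h

-- A's result, characterised over the (turn, sender) pairs
lemma A_char (a1 a2 : String) (xs : List (List (String × String))) :
    count_synchronized_actions_py a1 a2 xs =
      (((PySem.Set.ofList ((pvPairs xs).map (·.1))).countP
        (fun k => (((pvPairs xs).filter (fun p => p.1 == k)).map (·.2)).contains a1
          && (((pvPairs xs).filter (fun p => p.1 == k)).map (·.2)).contains a2) : Nat) : Int) := by
  have hfold : xs.foldl (fun d interaction => d.modify (pvItem interaction "turn") [] (fun l => l ++ [pvItem interaction "sender"])) PySem.Dict.empty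
      = (pvPairs xs).foldl (fun d p => d.modify p.1 [] (fun l => l ++ [p.2])) PySem.Dict.empty := by
    simp [pvPairs, List.foldl_map]
  have hkeys : ((pvPairs xs).foldl (fun d p => d.modify p.1 [] (fun l => l ++ [p.2])) PySem.Dict.empty).keys
      = PySem.Set.ofList ((pvPairs xs).map (·.1)) := by
    rw [PySem.Dict.keys_foldl_modify_key (pvPairs xs) (fun p => p.1) [] (fun _ p l => l ++ [p.2]),
      PySem.Dict.keys_empty]
    exact PySem.Set.update_empty _
  have hnd : ((pvPairs xs).foldl (fun d p => d.modify p.1 [] (fun l => l ++ [p.2])) PySem.Dict.empty).keys.Nodup := by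
    rw [hkeys]; exact PySem.Set.nodup_ofList _
  have hgetD : ∀ k, ((pvPairs xs).foldl (fun d p => d.modify p.1 [] (fun l => l ++ [p.2])) PySem.Dict.empty).getD k ([] : List String)
      = ((pvPairs xs).filter (fun p => p.1 == k)).map (·.2) := by
    intro k
    rw [PySem.Dict.getD_foldl_modify_append]
    simp
  simp only [count_synchronized_actions_py]
  rw [hfold, PySem.Dict.values_eq_map_keys _ hnd ([] : List String),
    PySem.List.foldl_count_if, List.countP_map, hkeys, zero_add]
  norm_cast
  apply List.countP_congr
  intro k hk
  simp [Function.comp, hgetD k]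

-- B's result, characterised the same way
lemma B_char (a1 a2 : String) (xs : List (List (String × String))) :
    count_synchronized_actions_py_alt a1 a2 xs =
      (((PySem.Set.inter
          (xs.foldl (fun s i => if pvItem i "sender" == a1 then PySem.Set.add s (pvItem i "turn") else s) PySem.Set.empty)
          (xs.foldl (fun s i => if pvItem i "sender" == a2 then PySem.Set.add s (pvItem i "turn") else s) PySem.Set.empty)).length : Nat) : Int) := by
  simp only [count_synchronized_actions_py_alt]
  rw [PySem.List.foldl_prod_mk
    (f := fun s i => if pvItem i "sender" == a1 then PySem.Set.add s (pvItem i "turn") else s)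
    (g := fun s i => if pvItem i "sender" == a2 then PySem.Set.add s (pvItem i "turn") else s)]
  simp [PySem.Set.len]

-- ===== VERDICT (by name: the statement is the Claim_ definition above) =====
theorem count_synchronized_actions_py_spec : Claim_equal_count_synchronized_actions_py := by
  intro a1 a2 xs _ _
  unfold Spec_count_synchronized_actions_py
  rw [A_char, B_char]
  norm_cast
  have h1 : (xs.foldl (fun s i => if pvItem i "sender" == a1 then PySem.Set.add s (pvItem i "turn") else s) PySem.Set.empty).Nodup :=
    nodup_foldl_cond_add a1 xs PySem.Set.empty List.nodup_nil
  have hperm : (((PySem.Set.ofList ((pvPairs xs).map (·.1))).filter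
      (fun k => (((pvPairs xs).filter (fun p => p.1 == k)).map (·.2)).contains a1
        && (((pvPairs xs).filter (fun p => p.1 == k)).map (·.2)).contains a2))).Perm
      (PySem.Set.inter
        (xs.foldl (fun s i => if pvItem i "sender" == a1 then PySem.Set.add s (pvItem i "turn") else s) PySem.Set.empty)
        (xs.foldl (fun s i => if pvItem i "sender" == a2 then PySem.Set.add s (pvItem i "turn") else s) PySem.Set.empty)) := by
    rw [List.perm_ext_iff_of_nodup ((PySem.Set.nodup_ofList _).filter _) (PySem.Set.nodup_inter _ _ h1)]
    intro x
    simp only [List.mem_filter, PySem.Set.mem_inter, mem_foldl_cond_add]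
    simp only [PySem.Set.mem_ofList, List.mem_map, pvPairs, List.contains_eq_mem,
      Bool.and_eq_true, decide_eq_true_eq, List.mem_filter, beq_iff_eq, PySem.Set.empty,
      List.not_mem_nil, false_or]
    constructor
    · rintro ⟨-, ⟨⟨p1, ⟨⟨i1, hi1, rfl⟩, hp1⟩, hs1⟩, ⟨p2, ⟨⟨i2, hi2, rfl⟩, hp2⟩, hs2⟩⟩⟩
      exact ⟨⟨i1, hi1, hs1, hp1⟩, ⟨i2, hi2, hs2, hp2⟩⟩
    · rintro ⟨⟨i1, hi1, hs1, hp1⟩, ⟨i2, hi2, hs2, hp2⟩⟩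
      exact ⟨⟨(pvItem i1 "turn", pvItem i1 "sender"), ⟨i1, hi1, rfl⟩, by simp [hp1]⟩,
        ⟨(pvItem i1 "turn", pvItem i1 "sender"), ⟨⟨i1, hi1, rfl⟩, hp1⟩, hs1⟩,
        ⟨(pvItem i2 "turn", pvItem i2 "sender"), ⟨⟨i2, hi2, rfl⟩, hp2⟩, hs2⟩⟩
  rw [List.countP_eq_length_filter, hperm.length_eq]
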